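-- pv_equiv track=rewrite | github.com/Ninosha/fake_data | csv_task/Flapp/helper_functions/data_generator_funcs.py | check_if_match
-- ===== SOURCE A (Python) =====
-- def check_if_match(my_cols, data_cols):
--     """
--     checks if received columns are the columns function handles and adds to matching_dict,
--     if not, columns will be added to not_matching list
--
--     :param my_cols: list of columns the application can generate
--     :param data_cols: list of columns received from csv file user uploaded
--     :return: dictionary/list
--     """
--     matching_dict = {}
--     for i in my_cols:
--         for j in list(data_cols):
--             if i in j.lower():
--                 matching_dict[i] = j
--                 data_cols.remove(j)
--     not_matching = data_cols
--
--     return matching_dict, not_matching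
-- ===== SOURCE B (Python) =====
-- def check_if_match(my_cols, data_cols):
--     """One pass over data_cols: each column is claimed by the first my_col that is a
--     substring of its lowercase form; per my_col the last claimed column wins.
--     Mutates data_cols in place (like A) to hold the unclaimed columns."""
--     last_match = {}
--     keep = []
--     for j in data_cols:
--         jl = j.lower()
--         owner = next((i for i in my_cols if i in jl), None)
--         if owner is None:
--             keep.append(j)
--         else:
--             last_match[owner] = j
--     matching_dict = {i: last_match[i] for i in my_cols if i in last_match}
--     data_cols[:] = keep
--     return matching_dict, data_cols
-- ===== Notes on version B (the rewrite author's own statement) =====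
-- stated objective: faster
-- what changed: Replaces A's my_cols-outer nested loop with its per-iteration snapshot copies and O(n) in-place remove() calls by a single data_cols-major pass that assigns each column to the first my_col contained in its lowercase form, then rebuilds the dict in my_cols order; all list copying and element removal disappears.
import Mathlib
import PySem

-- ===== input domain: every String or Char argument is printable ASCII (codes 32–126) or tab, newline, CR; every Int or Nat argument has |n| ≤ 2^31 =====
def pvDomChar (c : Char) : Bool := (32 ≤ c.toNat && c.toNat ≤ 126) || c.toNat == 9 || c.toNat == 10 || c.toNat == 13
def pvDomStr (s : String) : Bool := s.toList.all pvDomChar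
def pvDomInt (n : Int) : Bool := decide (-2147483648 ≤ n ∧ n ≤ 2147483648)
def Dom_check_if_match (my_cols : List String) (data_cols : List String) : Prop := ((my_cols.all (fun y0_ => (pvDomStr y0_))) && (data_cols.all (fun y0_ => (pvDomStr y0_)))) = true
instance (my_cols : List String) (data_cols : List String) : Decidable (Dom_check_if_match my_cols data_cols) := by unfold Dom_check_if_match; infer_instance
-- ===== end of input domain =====

-- B replaces A's my_cols-outer nested loops (snapshot copy + in-place remove per match) by one
-- data_cols-major pass assigning each column to its first containing my_col, then a dict rebuild
-- in my_cols order; equivalence is about the return value (both also leave data_cols's final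
-- contents the same, A by remove(), B by slice assignment).

-- ===== PORT A =====
def check_if_match (my_cols : List String) (data_cols : List String) : (List (String × String)) × List String :=
  let st := my_cols.foldl
    (fun (st : PySem.Dict String String × List String) i =>
      -- for j in list(data_cols): snapshot st.2, mutate st.2
      st.2.foldl
        (fun (st' : PySem.Dict String String × List String) j =>
          if PySem.Str.isIn i (PySem.Str.lower j) then
            (st'.1.insert i j, (PySem.List.remove? st'.2 j).getD st'.2)  -- remove never fails here
          else st')
        st)
    (PySem.Dict.empty, data_cols)
  (st.1.items, st.2)

-- ===== PORT B =====
def check_if_match_alt (my_cols : List String) (data_cols : List String) : (List (String × String)) × List String :=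
  let p := data_cols.foldl
    (fun (st : PySem.Dict String String × List String) j =>
      let jl := PySem.Str.lower j
      match my_cols.find? (fun i => PySem.Str.isIn i jl) with
      | some owner => (st.1.insert owner j, st.2)
      | none => (st.1, st.2 ++ [j]))
    (PySem.Dict.empty, ([] : List String))
  let md := my_cols.foldl
    (fun (d : PySem.Dict String String) i =>
      match p.1.get? i with
      | some v => d.insert i v
      | none => d)
    PySem.Dict.empty
  (md.items, p.2)

-- ===== PRECONDITION & SPEC =====
def Spec_check_if_match (my_cols : List String) (data_cols : List String) (out : (List (String × String)) × List String) : Prop := out = check_if_match_alt my_cols data_cols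
instance (my_cols : List String) (data_cols : List String) (out : (List (String × String)) × List String) : Decidable (Spec_check_if_match my_cols data_cols out) := by unfold Spec_check_if_match; infer_instance

-- ===== CLAIM (what is proved, stated in full; the proofs are below) =====
def Claim_equal_check_if_match : Prop := ∀ (my_cols : List String) (data_cols : List String), Dom_check_if_match my_cols data_cols → Spec_check_if_match my_cols data_cols (check_if_match my_cols data_cols)

-- ===== LEMMAS AND PROOFS =====

-- `i in j.lower()`
def mf (i j : String) : Bool := PySem.Str.isIn i (PySem.Str.lower j)

theorem innerA (i : String) : ∀ (s p : List String) (d : PySem.Dict String String),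
    (∀ x ∈ p, mf i x = false) →
    s.foldl (fun st' j => if PySem.Str.isIn i (PySem.Str.lower j) then
        (st'.1.insert i j, (PySem.List.remove? st'.2 j).getD st'.2) else st') (d, p ++ s)
    = ((match (s.filter (fun j => mf i j)).getLast? with
        | some v => d.insert i v
        | none => d),
       p ++ s.filter (fun j => !mf i j)) := by
  intro s
  induction s with
  | nil => intro p d hp; simp
  | cons j s ih =>
    intro p d hp
    by_cases h : mf i j
    · have hjp : j ∉ p := fun hm => by simp [hp j hm] at h
      have hrem : PySem.List.remove? (p ++ j :: s) j = some (p ++ s) := by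
        rw [PySem.List.remove?_eq_some_erase _ j (by simp)]
        rw [List.erase_append_right _ hjp, List.erase_cons_head]
      have h' : PySem.Str.isIn i (PySem.Str.lower j) = true := h
      simp only [List.foldl_cons, h', if_true, hrem, Option.getD_some]
      rw [ih p (d.insert i j) hp]
      have : (j :: s).filter (fun j => mf i j) = j :: s.filter (fun j => mf i j) := by
        simp [h]
      rw [this]
      cases hfs : (s.filter (fun j => mf i j)).getLast? with
      | none =>
        have hnil : s.filter (fun j => mf i j) = [] := List.getLast?_eq_none_iff.mp hfs
        simp [hnil, h]
      | some v =>
        obtain ⟨x, xs, hxe⟩ := List.exists_cons_of_ne_nil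
          (fun hnil => by rw [hnil] at hfs; simp at hfs :
            s.filter (fun j => mf i j) ≠ [])
        rw [hxe] at hfs ⊢
        simp [List.getLast?_cons_cons, hfs, PySem.Dict.insert_insert_self, h]
    · have h' : PySem.Str.isIn i (PySem.Str.lower j) = false := Bool.not_eq_true _ ▸ eq_false_of_ne_true h
      simp only [List.foldl_cons, h', if_false, Bool.false_eq_true]
      have hp' : ∀ x ∈ p ++ [j], mf i x = false := by
        intro x hx; rcases List.mem_append.mp hx with hx | hx
        · exact hp x hx
        · simp at hx; subst hx; exact h'
      have := ih (p ++ [j]) d hp'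
      simp only [List.append_assoc, List.singleton_append] at this
      rw [this]
      simp [h]

def stepA (st : PySem.Dict String String × List String) (i : String) :
    PySem.Dict String String × List String :=
  ((match (st.2.filter (fun j => mf i j)).getLast? with
    | some v => st.1.insert i v
    | none => st.1),
   st.2.filter (fun j => !mf i j))

def owner (m : List String) (j : String) : Option String := m.find? (fun i => mf i j)

def lastD (m : List String) (dc : List String) (d : PySem.Dict String String) : PySem.Dict String String :=
  dc.foldl (fun d j => match owner m j with | some o => d.insert o j | none => d) d

def rebuild (m : List String) (L : PySem.Dict String String) (d : PySem.Dict String String) : PySem.Dict String String :=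
  m.foldl (fun d i => match L.get? i with | some v => d.insert i v | none => d) d

theorem foldA (my : List String) : ∀ (st : PySem.Dict String String × List String),
    my.foldl (fun st i => st.2.foldl
        (fun st' j => if PySem.Str.isIn i (PySem.Str.lower j) then
          (st'.1.insert i j, (PySem.List.remove? st'.2 j).getD st'.2) else st') st) st
    = my.foldl stepA st := by
  induction my with
  | nil => intro st; rfl
  | cons i m ih =>
    intro st
    simp only [List.foldl_cons]
    rw [show (st.2.foldl
        (fun st' j => if PySem.Str.isIn i (PySem.Str.lower j) then
          (st'.1.insert i j, (PySem.List.remove? st'.2 j).getD st'.2) else st') st) = stepA st i from ?_, ih]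
    have := innerA i st.2 [] st.1 (by simp)
    simpa [stepA] using this

theorem insert_self_of_get? (d : PySem.Dict String String) (i v : String)
    (hn : d.keys.Nodup) (hg : d.get? i = some v) : d.insert i v = d := by
  apply PySem.Dict.ext
  rw [PySem.Dict.items_insert_of_contains]
  · have hmap : ∀ p ∈ d.items, (if (p.1 == i) = true then (i, v) else p) = id p := by
      intro p hp
      by_cases hpk : p.1 = i
      · have := PySem.Dict.get?_of_mem_items d (k := p.1) (v := p.2) (by simpa using hp) hn
        rw [hpk, hg] at this
        have hv : v = p.2 := Option.some_inj.mp this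
        cases p; cases hpk; cases hv; simp
      · simp [hpk]
    rw [List.map_congr_left hmap, List.map_id]
  · rw [PySem.Dict.contains_eq_isSome_get?, hg]; rfl

theorem owner_some_mf {m : List String} {j k : String} (h : owner m j = some k) : mf k j = true := by
  induction m with
  | nil => simp [owner] at h
  | cons i m ih =>
    by_cases hi : mf i j
    · rw [owner, List.find?_cons_of_pos (p := fun i => mf i j) hi] at h
      cases Option.some_inj.mp h; exact hi
    · rw [owner, List.find?_cons_of_neg (p := fun i => mf i j) (by simpa using hi)] at h
      exact ih h

theorem lastD_get? (m : List String) : ∀ (dc : List String) (d : PySem.Dict String String) (k : String),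
    (lastD m dc d).get? k
    = (match (dc.filter (fun j => decide (owner m j = some k))).getLast? with
       | some j => some j
       | none => d.get? k) := by
  intro dc
  induction dc with
  | nil => intro d k; rfl
  | cons j dc ih =>
    intro d k
    simp only [lastD, List.foldl_cons] at *
    cases ho : owner m j with
    | none => rw [ih]; simp [ho]
    | some o =>
      by_cases hok : o = k
      · subst hok
        rw [ih]
        simp only [ho, List.filter_cons, decide_eq_true_eq]
        cases hfs : (dc.filter (fun j => decide (owner m j = some o))).getLast? with
        | none =>
          have : dc.filter (fun j => decide (owner m j = some o)) = [] := List.getLast?_eq_none_iff.mp hfs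
          simp [this, PySem.Dict.get?_insert_self]
        | some w =>
          obtain ⟨x, xs, hxe⟩ := List.exists_cons_of_ne_nil
            (fun hnil => by rw [hnil] at hfs; simp at hfs :
              dc.filter (fun j => decide (owner m j = some o)) ≠ [])
          rw [hxe] at hfs ⊢
          simp [List.getLast?_cons_cons, hfs]
      · rw [ih]
        have : (d.insert o j).get? k = d.get? k := PySem.Dict.get?_insert_of_ne _ _ (fun h : k = o => hok h.symm)
        simp [ho, fun h : o = k => hok h, this]

theorem rebuild_congr (L L' : PySem.Dict String String) : ∀ (m : List String) (d : PySem.Dict String String),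
    (∀ k ∈ m, L.get? k = L'.get? k) → rebuild m L d = rebuild m L' d := by
  intro m
  induction m with
  | nil => intro d _; rfl
  | cons k m ih =>
    intro d h
    simp only [rebuild, List.foldl_cons] at *
    rw [h k (by simp)]
    exact ih _ (fun k' hk' => h k' (by simp [hk']))

theorem rebuild_drop (i v : String) (L L' : PySem.Dict String String)
    (hL : L.get? i = some v) (hL' : L'.get? i = none)
    (hne : ∀ k, k ≠ i → L.get? k = L'.get? k) :
    ∀ (m : List String) (d : PySem.Dict String String),
    d.keys.Nodup → d.get? i = some v → rebuild m L d = rebuild m L' d := by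
  intro m
  induction m with
  | nil => intro d _ _; rfl
  | cons k m ih =>
    intro d hn hg
    simp only [rebuild, List.foldl_cons] at *
    by_cases hk : k = i
    · subst hk
      simp only [hL, hL']
      rw [insert_self_of_get? d k v hn hg]
      exact ih d hn hg
    · rw [hne k hk]
      cases hLk : L'.get? k with
      | none => exact ih d hn hg
      | some w =>
        exact ih _ (PySem.Dict.nodup_keys_insert _ _ _ hn)
          (by rw [PySem.Dict.get?_insert_of_ne _ _ (fun h : i = k => hk h.symm)]; exact hg)

theorem splitB (my : List String) : ∀ (dc : List String) (d : PySem.Dict String String) (l : List String),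
    dc.foldl (fun st j =>
        let jl := PySem.Str.lower j
        match my.find? (fun i => PySem.Str.isIn i jl) with
        | some o => (st.1.insert o j, st.2)
        | none => (st.1, st.2 ++ [j])) (d, l)
    = (lastD my dc d, l ++ dc.filter (fun j => (owner my j).isNone)) := by
  intro dc
  induction dc with
  | nil => intro d l; simp [lastD]
  | cons j dc ih =>
    intro d l
    have ho' : my.find? (fun i => PySem.Str.isIn i (PySem.Str.lower j)) = owner my j := rfl
    simp only [List.foldl_cons, ho']
    cases ho : owner my j with
    | some o =>
      rw [ih]
      simp [lastD, ho]
    | none =>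
      rw [ih]
      simp [lastD, ho]

theorem owner_cons (i : String) (m : List String) (j : String) :
    owner (i :: m) j = if mf i j then some i else owner m j := by
  by_cases h : mf i j
  · rw [owner, List.find?_cons_of_pos (p := fun i => mf i j) h, if_pos h]
  · rw [owner, List.find?_cons_of_neg (p := fun i => mf i j) (by simpa using h), if_neg h]; rfl

theorem rebuild_cons (i : String) (m : List String) (L d : PySem.Dict String String) :
    rebuild (i :: m) L d
    = rebuild m L (match L.get? i with | some v => d.insert i v | none => d) := rfl

theorem mainA (my : List String) : ∀ (dc : List String) (d0 : PySem.Dict String String),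
    d0.keys.Nodup →
    my.foldl stepA (d0, dc)
    = (rebuild my (lastD my dc PySem.Dict.empty) d0,
       dc.filter (fun j => (owner my j).isNone)) := by
  induction my with
  | nil =>
    intro dc d0 _
    simp [rebuild, owner]
  | cons i m ih =>
    intro dc d0 hn
    simp only [List.foldl_cons]
    set dc' := dc.filter (fun j => !mf i j) with hdc'
    -- the keep lists agree
    have hkeep : dc'.filter (fun j => (owner m j).isNone) = dc.filter (fun j => (owner (i :: m) j).isNone) := by
      rw [hdc', List.filter_filter]
      apply List.filter_congr
      intro j _
      rw [owner_cons]
      by_cases h : mf i j <;> simp [h]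
    -- the i-filter equals the owner-(i::m)-is-i filter
    have hC1 : dc.filter (fun j => decide (owner (i :: m) j = some i)) = dc.filter (fun j => mf i j) := by
      apply List.filter_congr
      intro j _
      rw [owner_cons]
      by_cases h : mf i j
      · simp [h]
      · simp only [h, Bool.false_eq_true, if_false]
        by_cases ho : owner m j = some i
        · exact absurd (owner_some_mf ho) (by simpa using h)
        · simp [ho]
    -- L's lookup at i is the last i-match of dc
    have hLi : (lastD (i :: m) dc PySem.Dict.empty).get? i
        = (dc.filter (fun j => mf i j)).getLast? := by
      rw [lastD_get? (i :: m) dc PySem.Dict.empty i, hC1]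
      cases hfs : (dc.filter (fun j => mf i j)).getLast? with
      | none => simp
      | some v => simp
    -- for k ≠ i the two dicts agree
    have hF1 : ∀ k, k ≠ i →
        (lastD (i :: m) dc PySem.Dict.empty).get? k = (lastD m dc' PySem.Dict.empty).get? k := by
      intro k hk
      rw [lastD_get?, lastD_get?]
      have : dc'.filter (fun j => decide (owner m j = some k))
          = dc.filter (fun j => decide (owner (i :: m) j = some k)) := by
        rw [hdc', List.filter_filter]
        apply List.filter_congr
        intro j _
        rw [owner_cons]
        by_cases h : mf i j
        · simp [h, Ne.symm hk]
        · simp [h]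
      rw [this]
    -- the m-only dict never holds key i
    have hF2 : (lastD m dc' PySem.Dict.empty).get? i = none := by
      rw [lastD_get?]
      have : dc'.filter (fun j => decide (owner m j = some i)) = [] := by
        rw [List.filter_eq_nil_iff]
        intro j hj
        simp only [decide_eq_true_eq]
        intro hoc
        rw [hdc'] at hj
        have hji : mf i j = false := by simpa using (List.of_mem_filter hj)
        rw [owner_some_mf hoc] at hji; cases hji
      simp [this, PySem.Dict.get?_empty]
    cases hfs : (dc.filter (fun j => mf i j)).getLast? with
    | none =>
      -- no column matches i: the step is a no-op
      have hfil : dc.filter (fun j => mf i j) = [] := List.getLast?_eq_none_iff.mp hfs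
      have hall : ∀ j ∈ dc, mf i j = false := by
        intro j hj
        by_contra hcon
        have : j ∈ dc.filter (fun j => mf i j) := List.mem_filter.mpr ⟨hj, by simpa using hcon⟩
        rw [hfil] at this; simp at this
      have hdceq : dc' = dc := by
        rw [hdc', List.filter_eq_self]
        intro j hj; simp [hall j hj]
      have hstep : stepA (d0, dc) i = (d0, dc') := by
        simp [stepA, hfs, hdc']
      rw [hstep, ih dc' d0 hn, hkeep]
      congr 1
      show rebuild m (lastD m dc' PySem.Dict.empty) d0
        = rebuild (i :: m) (lastD (i :: m) dc PySem.Dict.empty) d0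
      rw [rebuild_cons]
      simp only [hLi, hfs]
      exact rebuild_congr _ _ m d0 (fun k hk => by
        by_cases hki : k = i
        · subst hki; rw [hF2, hLi, hfs]
        · exact (hF1 k hki).symm)
    | some v =>
      have hstep : stepA (d0, dc) i = (d0.insert i v, dc') := by
        simp [stepA, hfs, hdc']
      rw [hstep, ih dc' (d0.insert i v) (PySem.Dict.nodup_keys_insert _ _ _ hn), hkeep]
      congr 1
      show rebuild m (lastD m dc' PySem.Dict.empty) (d0.insert i v)
        = rebuild (i :: m) (lastD (i :: m) dc PySem.Dict.empty) d0
      rw [rebuild_cons]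
      simp only [hLi, hfs]
      exact (rebuild_drop i v _ _ (hLi.trans hfs) hF2 (fun k hk => hF1 k hk) m (d0.insert i v)
        (PySem.Dict.nodup_keys_insert _ _ _ hn) (PySem.Dict.get?_insert_self _ _ _)).symm

-- ===== VERDICT (by name: the statement is the Claim_ definition above) =====
theorem check_if_match_spec : Claim_equal_check_if_match := by
  intro my dc _
  show check_if_match my dc = check_if_match_alt my dc
  rw [check_if_match, check_if_match_alt]
  rw [foldA, mainA my dc PySem.Dict.empty (by simp [PySem.Dict.keys_empty]), splitB]
  simp [rebuild]
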